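-- pv_equiv track=rewrite | github.com/hamsunwoo/coding_test | programmers/heap/더_맵게.py | solution
-- ===== SOURCE A (Python) =====
-- import heapq
--
-- def solution(scoville, K):
--     heapq.heapify(scoville)
--     answer = 0
--
--     while len(scoville) > 1:
--         f = heapq.heappop(scoville)
--         if f >= K:
--             break
--
--         s = heapq.heappop(scoville)
--         formula = f + (s*2)
--
--         heapq.heappush(scoville, formula)
--         answer += 1
--
--     return answer if scoville[0] >= K else -1
-- ===== SOURCE B (Python) =====
-- from collections import deque
--
-- def solution(scoville, K):
--     # Two-pointer merge: sort a copy once, then consume the minimum from either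
--     # the sorted originals or a FIFO queue of produced mixes (which come out in
--     # non-decreasing order), so no heap and no re-insertion into a sorted
--     # structure is ever needed.  Return-value equivalent to A; unlike A it does
--     # not mutate the argument.
--     xs = sorted(scoville)
--     q = deque()
--     i = 0
--     answer = 0
--
--     def pop_min():
--         nonlocal i
--         if i < len(xs) and (not q or xs[i] <= q[0]):
--             v = xs[i]
--             i += 1
--             return v
--         return q.popleft()
--
--     while (len(xs) - i) + len(q) > 1:
--         f = pop_min()
--         if f >= K:
--             return answer
--         s = pop_min()
--         q.append(f + 2 * s)
--         answer += 1
--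
--     last = xs[i] if i < len(xs) else q[0]
--     return answer if last >= K else -1
-- ===== Notes on version B (the rewrite author's own statement) =====
-- stated objective: faster
-- what changed: Replaces the binary heap with a sort-once two-pointer merge: each minimum is read from the front of the sorted input or of a FIFO queue of produced mixes (emitted in non-decreasing order), so per-mix work drops from O(log n) sift operations to O(1) pointer moves.
-- outside the precondition, e.g. on solution([], 0): A raises IndexError, B raises IndexError
import Mathlib
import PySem

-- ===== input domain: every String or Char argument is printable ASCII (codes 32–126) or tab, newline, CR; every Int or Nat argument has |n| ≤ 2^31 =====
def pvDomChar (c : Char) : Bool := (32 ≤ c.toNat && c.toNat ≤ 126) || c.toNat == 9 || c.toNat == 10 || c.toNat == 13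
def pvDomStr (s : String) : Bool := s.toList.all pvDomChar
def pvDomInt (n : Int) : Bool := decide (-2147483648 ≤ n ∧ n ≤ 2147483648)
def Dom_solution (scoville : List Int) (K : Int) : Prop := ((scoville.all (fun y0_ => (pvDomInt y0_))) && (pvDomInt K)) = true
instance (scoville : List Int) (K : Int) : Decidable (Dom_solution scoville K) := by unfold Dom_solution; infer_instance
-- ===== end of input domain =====

-- B replaces A's binary heap by a sort-once two-pointer merge with a FIFO queue of
-- produced mixes (objective: alternative). Return-value equivalence only: A mutates
-- the Python argument (heapify), B does not.

-- ===== PORT A =====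
-- heapq is transliterated by hand (PySem has no heapq). List indexing inside the
-- heapq routines uses List.getD 0: exact here because every index heapq reads or
-- writes is in range for the list, so the default is never consulted.

-- heapq._siftdown(heap, startpos, pos): 'newitem' bubble-up loop; the final
-- 'heap[pos] = newitem' write is the else/exit branch.
-- fuel = pos: 'pos' strictly decreases each iteration, so the fuel is never
-- exhausted (at fuel 0 we have pos ≤ startpos and both branches coincide).
def pySiftdownGo : Nat → List Int → Nat → Nat → Int → List Int
  | 0, a, _startpos, pos, newitem => a.set pos newitem
  | fuel + 1, a, startpos, pos, newitem =>
    if startpos < pos then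
      if newitem < a.getD ((pos - 1) / 2) 0 then
        pySiftdownGo fuel (a.set pos (a.getD ((pos - 1) / 2) 0)) startpos ((pos - 1) / 2) newitem
      else a.set pos newitem
    else a.set pos newitem

def pySiftdownLoop (a : List Int) (startpos pos : Nat) (newitem : Int) : List Int :=
  pySiftdownGo pos a startpos pos newitem

def pySiftdown (a : List Int) (startpos pos : Nat) : List Int :=
  pySiftdownLoop a startpos pos (a.getD pos 0)

-- heapq._siftup(heap, pos): drag the hole down to a leaf along the smaller child…
-- fuel = endpos - childpos: childpos strictly increases; at fuel 0 the loop
-- condition childpos < endpos is false and both branches coincide.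
def pySiftupGo : Nat → List Int → Nat → Nat → Nat → List Int × Nat
  | 0, a, pos, _childpos, _endpos => (a, pos)
  | fuel + 1, a, pos, childpos, endpos =>
    if childpos < endpos then
      if childpos + 1 < endpos ∧ ¬ (a.getD childpos 0 < a.getD (childpos + 1) 0) then
        pySiftupGo fuel (a.set pos (a.getD (childpos + 1) 0)) (childpos + 1) (2 * (childpos + 1) + 1) endpos
      else
        pySiftupGo fuel (a.set pos (a.getD childpos 0)) childpos (2 * childpos + 1) endpos
    else (a, pos)

def pySiftupLoop (a : List Int) (pos childpos endpos : Nat) : List Int × Nat :=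
  pySiftupGo (endpos - childpos) a pos childpos endpos

-- …then 'heap[pos] = newitem; _siftdown(heap, startpos, pos)'.
def pySiftup (a : List Int) (pos : Nat) : List Int :=
  pySiftdown
    ((pySiftupLoop a pos (2 * pos + 1) a.length).1.set
      (pySiftupLoop a pos (2 * pos + 1) a.length).2 (a.getD pos 0))
    pos (pySiftupLoop a pos (2 * pos + 1) a.length).2

-- heapq.heapify: for i in reversed(range(n//2)): _siftup(x, i)
def pyHeapify (a : List Int) : List Int :=
  (List.range (a.length / 2)).reverse.foldl (fun h i => pySiftup h i) a

def pyHeappush (h : List Int) (item : Int) : List Int :=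
  pySiftdown (h ++ [item]) 0 h.length

-- heapq.heappop; on the empty list Python raises IndexError (excluded by Pre_).
def pyHeappop (h : List Int) : Int × List Int :=
  if h.dropLast.isEmpty then (h.getLastD 0, [])
  else (h.dropLast.getD 0 0, pySiftup (h.dropLast.set 0 (h.getLastD 0)) 0)

-- fuel = heap.length: each iteration removes one element net (pop, pop, push);
-- at fuel 0 the list is empty, the loop condition is false and branches coincide.
def loopAGo : Nat → List Int → Int → Int → List Int × Int
  | 0, heap, _K, answer => (heap, answer)
  | fuel + 1, heap, K, answer =>
    if 1 < heap.length then
      if (pyHeappop heap).1 ≥ K then ((pyHeappop heap).2, answer)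
      else
        loopAGo fuel (pyHeappush (pyHeappop (pyHeappop heap).2).2
            ((pyHeappop heap).1 + (pyHeappop (pyHeappop heap).2).1 * 2)) K (answer + 1)
    else (heap, answer)

def loopA (heap : List Int) (K answer : Int) : List Int × Int :=
  loopAGo heap.length heap K answer

-- scoville[0]: in range whenever scoville ≠ [] (Pre_solution)
def solution (scoville : List Int) (K : Int) : Int :=
  if (loopA (pyHeapify scoville) K 0).1.getD 0 0 ≥ K then (loopA (pyHeapify scoville) K 0).2
  else -1

-- ===== PORT B =====
-- Source B's index i into the sorted list and its deque are represented by the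
-- remaining suffix lists 'rest' and 'q'; pop_min compares the two front
-- elements exactly as Source B does.
def popMinB : List Int → List Int → Int × List Int × List Int
  | x :: r, [] => (x, r, [])
  | x :: r, p :: qt => if x ≤ p then (x, r, p :: qt) else (p, x :: r, qt)
  | [], p :: qt => (p, [], qt)
  | [], [] => (0, [], [])   -- both empty: unreachable under the loop guard / Pre_ (Python raises IndexError)

-- fuel = initial total size; the merge shrinks by one element per iteration, so
-- at fuel 0 at most one element remains and both branches coincide.
def loopBGo : Nat → List Int → List Int → Int → Int → Int
  | 0, rest, q, K, answer => if (rest ++ q).getD 0 0 ≥ K then answer else -1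
  | fuel + 1, rest, q, K, answer =>
    if 1 < rest.length + q.length then
      if (popMinB rest q).1 ≥ K then answer
      else
        loopBGo fuel (popMinB (popMinB rest q).2.1 (popMinB rest q).2.2).2.1
          ((popMinB (popMinB rest q).2.1 (popMinB rest q).2.2).2.2 ++
            [(popMinB rest q).1 + 2 * (popMinB (popMinB rest q).2.1 (popMinB rest q).2.2).1])
          K (answer + 1)
    else if (rest ++ q).getD 0 0 ≥ K then answer else -1

def loopB (rest q : List Int) (K answer : Int) : Int :=
  loopBGo (rest.length + q.length) rest q K answer

def solution_alt (scoville : List Int) (K : Int) : Int :=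
  loopB (PySem.List.sorted scoville (fun x => x) false) [] K 0

-- ===== PRECONDITION & SPEC =====
-- On scoville = [] Python's final indexing (scoville[0] / q[0]) raises IndexError in A and in B alike.
def Pre_solution (scoville : List Int) (K : Int) : Prop := scoville ≠ []
instance (scoville : List Int) (K : Int) : Decidable (Pre_solution scoville K) := by
  unfold Pre_solution; infer_instance

def pvWitness_solution : List Int × Int := ([1, 2, 3, 9, 10, 12], 7)

def Spec_solution (scoville : List Int) (K : Int) (out : Int) : Prop := out = solution_alt scoville K
instance (scoville : List Int) (K : Int) (out : Int) : Decidable (Spec_solution scoville K out) := by unfold Spec_solution; infer_instance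

-- ===== CLAIM (what is proved, stated in full; the proofs are below) =====
def Claim_equal_solution : Prop := ∀ (scoville : List Int) (K : Int), Dom_solution scoville K → Pre_solution scoville K → Spec_solution scoville K (solution scoville K)

-- ===== LEMMAS AND PROOFS =====

theorem length_pySiftdownGo (fuel : Nat) : ∀ (a : List Int) (startpos pos : Nat) (newitem : Int),
    (pySiftdownGo fuel a startpos pos newitem).length = a.length := by
  induction fuel with
  | zero => intro a sp p x; simp [pySiftdownGo]
  | succ fuel IH =>
    intro a sp p x
    rw [pySiftdownGo]
    split_ifs with h1 h2
    · rw [IH]; simp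
    · simp
    · simp

theorem length_pySiftdownLoop (a : List Int) (startpos pos : Nat) (newitem : Int) :
    (pySiftdownLoop a startpos pos newitem).length = a.length :=
  length_pySiftdownGo pos a startpos pos newitem

theorem length_pySiftupGo (fuel : Nat) : ∀ (a : List Int) (pos childpos endpos : Nat),
    (pySiftupGo fuel a pos childpos endpos).1.length = a.length := by
  induction fuel with
  | zero => intro a p c e; rfl
  | succ fuel IH =>
    intro a p c e
    rw [pySiftupGo]
    split_ifs with h1 h2
    · rw [IH]; simp
    · rw [IH]; simp
    · rfl

theorem length_pySiftupLoop (a : List Int) (pos childpos endpos : Nat) :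
    (pySiftupLoop a pos childpos endpos).1.length = a.length :=
  length_pySiftupGo (endpos - childpos) a pos childpos endpos

theorem length_pySiftup (a : List Int) (pos : Nat) :
    (pySiftup a pos).length = a.length := by
  unfold pySiftup pySiftdown
  rw [length_pySiftdownLoop]
  simp [length_pySiftupLoop]

theorem length_pyHeappop (h : List Int) : (pyHeappop h).2.length = h.length - 1 := by
  unfold pyHeappop
  split
  · next hE => rw [List.isEmpty_iff] at hE
               have := congrArg List.length hE; simp at this; simp; omega
  · simp [length_pySiftup]

theorem length_pyHeappush (h : List Int) (x : Int) :
    (pyHeappush h x).length = h.length + 1 := by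
  unfold pyHeappush pySiftdown; rw [length_pySiftdownLoop]; simp

-- index/getD helpers ---------------------------------------------------------

theorem gset_self (l : List Int) (i : Nat) (x : Int) (h : i < l.length) :
    (l.set i x).getD i 0 = x := by
  rw [List.getD_eq_getElem _ _ (by simpa using h)]; simp

theorem gset_ne (l : List Int) (i j : Nat) (x : Int) (h : i ≠ j) :
    (l.set i x).getD j 0 = l.getD j 0 := by
  simp [List.getD_eq_getElem?_getD, List.getElem?_set_ne h]

theorem set_getD_self (l : List Int) (i : Nat) (h : i < l.length) :
    l.set i (l.getD i 0) = l := by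
  rw [List.getD_eq_getElem _ _ h]; exact List.set_getElem_self h

theorem mset_set (l : List Int) (i : Nat) (x : Int) (h : i < l.length) :
    (↑(l.set i x) : Multiset Int) + {l.getD i 0} = x ::ₘ (↑l : Multiset Int) := by
  induction l generalizing i with
  | nil => simp at h
  | cons y t IH =>
    cases i with
    | zero =>
      show (↑(x :: t) : Multiset Int) + {y} = x ::ₘ ↑(y :: t)
      rw [add_comm]
      show y ::ₘ x ::ₘ (↑t : Multiset Int) = x ::ₘ y ::ₘ ↑t
      exact Multiset.cons_swap y x ↑t
    | succ i =>
      show (↑(y :: t.set i x) : Multiset Int) + {t.getD i 0} = x ::ₘ ↑(y :: t)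
      have : (↑(y :: t.set i x) : Multiset Int) = y ::ₘ ↑(t.set i x) := rfl
      rw [this, Multiset.cons_add, IH i (by simpa using h)]
      exact Multiset.cons_swap y x ↑t

theorem mset_set_set (a : List Int) (i j : Nat) (x : Int)
    (hi : i < a.length) (hj : j < a.length) (hij : i ≠ j) :
    (↑((a.set i (a.getD j 0)).set j x) : Multiset Int) = ↑(a.set i x) := by
  have hlen : j < (a.set i (a.getD j 0)).length := by simpa using hj
  have h1 := mset_set (a.set i (a.getD j 0)) j x hlen
  rw [gset_ne a i j _ hij] at h1
  have h2 := mset_set a i (a.getD j 0) hi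
  have h3 := mset_set a i x hi
  have key : (↑((a.set i (a.getD j 0)).set j x) : Multiset Int) + ({a.getD j 0} + {a.getD i 0})
      = (↑(a.set i x) : Multiset Int) + ({a.getD j 0} + {a.getD i 0}) := by
    calc (↑((a.set i (a.getD j 0)).set j x) : Multiset Int) + ({a.getD j 0} + {a.getD i 0})
        = (↑((a.set i (a.getD j 0)).set j x) + {a.getD j 0}) + {a.getD i 0} := by
          rw [add_assoc]
      _ = (x ::ₘ ↑(a.set i (a.getD j 0))) + {a.getD i 0} := by rw [h1]
      _ = x ::ₘ (↑(a.set i (a.getD j 0)) + {a.getD i 0}) := by rw [Multiset.cons_add]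
      _ = x ::ₘ (a.getD j 0 ::ₘ ↑a) := by rw [h2]
      _ = a.getD j 0 ::ₘ (x ::ₘ ↑a) := Multiset.cons_swap _ _ _
      _ = a.getD j 0 ::ₘ (↑(a.set i x) + {a.getD i 0}) := by rw [h3]
      _ = (a.getD j 0 ::ₘ ↑(a.set i x)) + {a.getD i 0} := by rw [Multiset.cons_add]
      _ = ({a.getD j 0} + ↑(a.set i x)) + {a.getD i 0} := by rw [Multiset.singleton_add]
      _ = ↑(a.set i x) + ({a.getD j 0} + {a.getD i 0}) := by
          rw [add_comm ({a.getD j 0} : Multiset Int) _, add_assoc]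
  exact add_right_cancel key

-- the subtree-membership relation (p is an ancestor-or-self of j) -------------

def inSub (p j : Nat) : Bool :=
  if j = p then true
  else if j < p then false
  else inSub p ((j - 1) / 2)
termination_by j
decreasing_by omega

theorem inSub_self (p : Nat) : inSub p p = true := by rw [inSub]; simp

theorem inSub_le (p j : Nat) (h : inSub p j = true) : p ≤ j := by
  induction j using Nat.strong_induction_on with
  | _ j IH =>
    rw [inSub] at h
    split at h
    · omega
    · split at h
      · exact absurd h (by simp)
      · omega

theorem inSub_parent (p j : Nat) (h : inSub p j = true) (hne : j ≠ p) :
    p ≤ (j - 1) / 2 ∧ inSub p ((j - 1) / 2) = true ∧ 1 ≤ j := by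
  have hle := inSub_le p j h
  rw [inSub] at h
  rw [if_neg hne, if_neg (by omega)] at h
  exact ⟨inSub_le _ _ h, h, by omega⟩

theorem inSub_zero (j : Nat) : inSub 0 j = true := by
  induction j using Nat.strong_induction_on with
  | _ j IH =>
    rw [inSub]
    split
    · rfl
    · rw [if_neg (by omega)]; exact IH _ (by omega)

theorem sdGo_spec (fuel : Nat) (startpos : Nat) (newitem : Int) : ∀ (a : List Int) (pos : Nat),
    pos ≤ fuel + startpos →
    pos < a.length → inSub startpos pos = true →
    (∀ j, j < a.length → 1 ≤ j → startpos ≤ (j - 1) / 2 → j ≠ pos → (j - 1) / 2 ≠ pos →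
        a.getD ((j - 1) / 2) 0 ≤ a.getD j 0) →
    (∀ c, c < a.length → 1 ≤ c → (c - 1) / 2 = pos →
        newitem ≤ a.getD c 0 ∧ (startpos < pos → a.getD ((pos - 1) / 2) 0 ≤ a.getD c 0)) →
    (∀ j, j < a.length → 1 ≤ j → startpos ≤ (j - 1) / 2 →
        (pySiftdownGo fuel a startpos pos newitem).getD ((j - 1) / 2) 0 ≤
          (pySiftdownGo fuel a startpos pos newitem).getD j 0) ∧
      (↑(pySiftdownGo fuel a startpos pos newitem) : Multiset Int) = ↑(a.set pos newitem) := by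
  induction fuel with
  | zero =>
    intro a pos hfuel hpos hsub hI1 hI2
    have heq : pos = startpos := by have := inSub_le startpos pos hsub; omega
    rw [pySiftdownGo]
    refine ⟨?_, rfl⟩
    intro j hj hj1 hjs
    by_cases hjpos : j = pos
    · subst hjpos; omega
    · by_cases hpj : (j - 1) / 2 = pos
      · rw [hpj, gset_self a pos _ hpos, gset_ne a pos j _ (by omega)]
        exact (hI2 j hj hj1 hpj).1
      · rw [gset_ne a pos _ _ (by omega), gset_ne a pos j _ (by omega)]
        exact hI1 j hj hj1 hjs hjpos hpj
  | succ fuel IH =>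
    intro a pos hfuel hpos hsub hI1 hI2
    by_cases h1 : startpos < pos
    · by_cases h2 : newitem < a.getD ((pos - 1) / 2) 0
      · -- swap case
        have hpos1 : 1 ≤ pos := by omega
        have hpar := inSub_parent startpos pos hsub (by omega)
        have hpplt : (pos - 1) / 2 < a.length := by omega
        have hI1' : ∀ j, j < (a.set pos (a.getD ((pos - 1) / 2) 0)).length → 1 ≤ j →
            startpos ≤ (j - 1) / 2 → j ≠ (pos - 1) / 2 → (j - 1) / 2 ≠ (pos - 1) / 2 →
            (a.set pos (a.getD ((pos - 1) / 2) 0)).getD ((j - 1) / 2) 0 ≤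
              (a.set pos (a.getD ((pos - 1) / 2) 0)).getD j 0 := by
          intro j hj hj1 hjs hjne hpjne
          rw [List.length_set] at hj
          have hjpos : j ≠ pos := by omega
          by_cases hpj : (j - 1) / 2 = pos
          · rw [hpj, gset_self a pos _ hpos, gset_ne a pos j _ (by omega)]
            exact (hI2 j hj hj1 hpj).2 h1
          · rw [gset_ne a pos _ _ (by omega), gset_ne a pos j _ (by omega)]
            exact hI1 j hj hj1 hjs hjpos hpj
        have hI2' : ∀ c, c < (a.set pos (a.getD ((pos - 1) / 2) 0)).length → 1 ≤ c →
            (c - 1) / 2 = (pos - 1) / 2 →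
            newitem ≤ (a.set pos (a.getD ((pos - 1) / 2) 0)).getD c 0 ∧
              (startpos < (pos - 1) / 2 →
                (a.set pos (a.getD ((pos - 1) / 2) 0)).getD (((pos - 1) / 2 - 1) / 2) 0 ≤
                  (a.set pos (a.getD ((pos - 1) / 2) 0)).getD c 0) := by
          intro c hc hc1 hcp
          rw [List.length_set] at hc
          have hgp : ∀ hlt : startpos < (pos - 1) / 2,
              a.getD (((pos - 1) / 2 - 1) / 2) 0 ≤ a.getD ((pos - 1) / 2) 0 := by
            intro hlt
            have hpar2 := inSub_parent startpos ((pos - 1) / 2) hpar.2.1 (by omega)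
            exact hI1 ((pos - 1) / 2) hpplt (by omega) hpar2.1 (by omega) (by omega)
          by_cases hcpos : c = pos
          · subst hcpos
            constructor
            · rw [gset_self a c _ hpos]; exact le_of_lt h2
            · intro hlt
              rw [gset_self a c _ hpos, gset_ne a c _ _ (by omega)]
              exact hgp hlt
          · have hcv : (a.set pos (a.getD ((pos - 1) / 2) 0)).getD c 0 = a.getD c 0 :=
              gset_ne a pos c _ (by omega)
            have hedge := hI1 c hc hc1 (by omega) hcpos (by omega)
            rw [hcp] at hedge
            constructor
            · rw [hcv]; exact le_of_lt (lt_of_lt_of_le h2 hedge)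
            · intro hlt
              rw [hcv, gset_ne a pos _ _ (by omega)]
              exact le_trans (hgp hlt) hedge
        have IHc := IH (a.set pos (a.getD ((pos - 1) / 2) 0)) ((pos - 1) / 2)
          (by omega) (by simpa using hpplt) hpar.2.1 hI1' hI2'
        rw [pySiftdownGo, if_pos h1, if_pos h2]
        constructor
        · intro j hj hj1 hjs
          exact IHc.1 j (by simpa using hj) hj1 hjs
        · rw [IHc.2]
          exact mset_set_set a pos ((pos - 1) / 2) newitem hpos hpplt (by omega)
      · rw [pySiftdownGo, if_pos h1, if_neg h2]
        refine ⟨?_, rfl⟩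
        intro j hj hj1 hjs
        by_cases hjpos : j = pos
        · subst hjpos
          rw [gset_self a j _ hpos, gset_ne a j _ _ (by omega)]
          omega
        · by_cases hpj : (j - 1) / 2 = pos
          · rw [hpj, gset_self a pos _ hpos, gset_ne a pos j _ (by omega)]
            exact (hI2 j hj hj1 hpj).1
          · rw [gset_ne a pos _ _ (by omega), gset_ne a pos j _ (by omega)]
            exact hI1 j hj hj1 hjs hjpos hpj
    · have heq : pos = startpos := by have := inSub_le startpos pos hsub; omega
      rw [pySiftdownGo, if_neg h1]
      refine ⟨?_, rfl⟩
      intro j hj hj1 hjs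
      by_cases hjpos : j = pos
      · subst hjpos; omega
      · by_cases hpj : (j - 1) / 2 = pos
        · rw [hpj, gset_self a pos _ hpos, gset_ne a pos j _ (by omega)]
          exact (hI2 j hj hj1 hpj).1
        · rw [gset_ne a pos _ _ (by omega), gset_ne a pos j _ (by omega)]
          exact hI1 j hj hj1 hjs hjpos hpj

theorem sd_spec (startpos : Nat) (newitem : Int) (a : List Int) (pos : Nat) :
    pos < a.length → inSub startpos pos = true →
    (∀ j, j < a.length → 1 ≤ j → startpos ≤ (j - 1) / 2 → j ≠ pos → (j - 1) / 2 ≠ pos →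
        a.getD ((j - 1) / 2) 0 ≤ a.getD j 0) →
    (∀ c, c < a.length → 1 ≤ c → (c - 1) / 2 = pos →
        newitem ≤ a.getD c 0 ∧ (startpos < pos → a.getD ((pos - 1) / 2) 0 ≤ a.getD c 0)) →
    (∀ j, j < a.length → 1 ≤ j → startpos ≤ (j - 1) / 2 →
        (pySiftdownLoop a startpos pos newitem).getD ((j - 1) / 2) 0 ≤
          (pySiftdownLoop a startpos pos newitem).getD j 0) ∧
      (↑(pySiftdownLoop a startpos pos newitem) : Multiset Int) = ↑(a.set pos newitem) := by
  intro hpos hsub hI1 hI2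
  exact sdGo_spec pos startpos newitem a pos (by omega) hpos hsub hI1 hI2

theorem suGo_spec (fuel : Nat) (startpos endpos : Nat) : ∀ (a : List Int) (pos childpos : Nat),
    endpos - childpos ≤ fuel →
    endpos = a.length → pos < a.length → childpos = 2 * pos + 1 →
    inSub startpos pos = true →
    (∀ j, j < a.length → 1 ≤ j → startpos ≤ (j - 1) / 2 → j ≠ pos → (j - 1) / 2 ≠ pos →
        a.getD ((j - 1) / 2) 0 ≤ a.getD j 0) →
    (∀ c, c < a.length → 1 ≤ c → (c - 1) / 2 = pos →
        (startpos < pos → a.getD ((pos - 1) / 2) 0 ≤ a.getD c 0)) →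
    (pySiftupGo fuel a pos childpos endpos).2 < a.length ∧
      inSub startpos (pySiftupGo fuel a pos childpos endpos).2 = true ∧
      a.length ≤ 2 * (pySiftupGo fuel a pos childpos endpos).2 + 1 ∧
      (∀ j, j < a.length → 1 ≤ j → startpos ≤ (j - 1) / 2 →
          j ≠ (pySiftupGo fuel a pos childpos endpos).2 →
          (j - 1) / 2 ≠ (pySiftupGo fuel a pos childpos endpos).2 →
          (pySiftupGo fuel a pos childpos endpos).1.getD ((j - 1) / 2) 0 ≤
            (pySiftupGo fuel a pos childpos endpos).1.getD j 0) ∧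
      (∀ x : Int, (↑((pySiftupGo fuel a pos childpos endpos).1.set
          (pySiftupGo fuel a pos childpos endpos).2 x) : Multiset Int) = ↑(a.set pos x)) := by
  induction fuel with
  | zero =>
    intro a pos childpos hfuel hend hpos hcp hsub hJ1 hJ3
    rw [pySiftupGo]
    exact ⟨hpos, hsub, by omega, hJ1, fun x => rfl⟩
  | succ fuel IH =>
    intro a pos childpos hfuel hend hpos hcp hsub hJ1 hJ3
    by_cases h1 : childpos < endpos
    · by_cases h2 : childpos + 1 < endpos ∧ ¬ a.getD childpos 0 < a.getD (childpos + 1) 0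
      · have hsp : startpos ≤ pos := inSub_le startpos pos hsub
        have hc'lt : childpos + 1 < a.length := by omega
        have hme : a.getD (childpos + 1) 0 ≤ a.getD childpos 0 := by
          have := h2.2; omega
        have hsub' : inSub startpos (childpos + 1) = true := by
          rw [inSub, if_neg (by omega), if_neg (by omega)]
          have : (childpos + 1 - 1) / 2 = pos := by omega
          rw [this]; exact hsub
        have hJ1' : ∀ j, j < (a.set pos (a.getD (childpos + 1) 0)).length → 1 ≤ j →
            startpos ≤ (j - 1) / 2 → j ≠ childpos + 1 → (j - 1) / 2 ≠ childpos + 1 →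
            (a.set pos (a.getD (childpos + 1) 0)).getD ((j - 1) / 2) 0 ≤
              (a.set pos (a.getD (childpos + 1) 0)).getD j 0 := by
          intro j hj hj1 hjs hjne hpjne
          rw [List.length_set] at hj
          by_cases hjpos : j = pos
          · subst hjpos
            have hlt : startpos < j := by omega
            rw [gset_self a j _ hpos, gset_ne a j _ _ (by omega)]
            exact hJ3 (childpos + 1) hc'lt (by omega) (by omega) hlt
          · by_cases hpj : (j - 1) / 2 = pos
            · have hjcp : j = childpos := by omega
              subst hjcp
              rw [hpj, gset_self a pos _ hpos, gset_ne a pos _ _ (by omega)]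
              exact hme
            · rw [gset_ne a pos _ _ (by omega), gset_ne a pos j _ (by omega)]
              exact hJ1 j hj hj1 hjs hjpos hpj
        have hJ3' : ∀ c, c < (a.set pos (a.getD (childpos + 1) 0)).length → 1 ≤ c →
            (c - 1) / 2 = childpos + 1 →
            (startpos < childpos + 1 →
              (a.set pos (a.getD (childpos + 1) 0)).getD ((childpos + 1 - 1) / 2) 0 ≤
                (a.set pos (a.getD (childpos + 1) 0)).getD c 0) := by
          intro c hc hc1 hcp' _
          rw [List.length_set] at hc
          have hpc : (childpos + 1 - 1) / 2 = pos := by omega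
          rw [hpc, gset_self a pos _ hpos, gset_ne a pos c _ (by omega)]
          have h := hJ1 c hc hc1 (by omega) (by omega) (by omega)
          rw [hcp'] at h; exact h
        have IHc := IH (a.set pos (a.getD (childpos + 1) 0)) (childpos + 1) (2 * (childpos + 1) + 1)
          (by omega) (by simpa using hend) (by simpa using hc'lt) rfl hsub' hJ1' hJ3'
        rw [List.length_set] at IHc
        rw [pySiftupGo, if_pos h1, if_pos h2]
        refine ⟨IHc.1, IHc.2.1, IHc.2.2.1, IHc.2.2.2.1, ?_⟩
        intro x
        rw [IHc.2.2.2.2 x]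
        exact mset_set_set a pos (childpos + 1) x hpos hc'lt (by omega)
      · have hsp : startpos ≤ pos := inSub_le startpos pos hsub
        have hclt : childpos < a.length := by omega
        have hsub' : inSub startpos childpos = true := by
          rw [inSub, if_neg (by omega), if_neg (by omega)]
          have : (childpos - 1) / 2 = pos := by omega
          rw [this]; exact hsub
        have hme : ∀ hr : childpos + 1 < a.length, a.getD childpos 0 ≤ a.getD (childpos + 1) 0 := by
          intro hr
          rcases Decidable.em (a.getD childpos 0 < a.getD (childpos + 1) 0) with h | h
          · exact le_of_lt h
          · exact absurd ⟨by omega, h⟩ h2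
        have hJ1' : ∀ j, j < (a.set pos (a.getD childpos 0)).length → 1 ≤ j →
            startpos ≤ (j - 1) / 2 → j ≠ childpos → (j - 1) / 2 ≠ childpos →
            (a.set pos (a.getD childpos 0)).getD ((j - 1) / 2) 0 ≤
              (a.set pos (a.getD childpos 0)).getD j 0 := by
          intro j hj hj1 hjs hjne hpjne
          rw [List.length_set] at hj
          by_cases hjpos : j = pos
          · subst hjpos
            have hlt : startpos < j := by omega
            rw [gset_self a j _ hpos, gset_ne a j _ _ (by omega)]
            exact hJ3 childpos hclt (by omega) (by omega) hlt
          · by_cases hpj : (j - 1) / 2 = pos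
            · have hjcp : j = childpos + 1 := by omega
              subst hjcp
              rw [hpj, gset_self a pos _ hpos, gset_ne a pos _ _ (by omega)]
              exact hme hj
            · rw [gset_ne a pos _ _ (by omega), gset_ne a pos j _ (by omega)]
              exact hJ1 j hj hj1 hjs hjpos hpj
        have hJ3' : ∀ c, c < (a.set pos (a.getD childpos 0)).length → 1 ≤ c →
            (c - 1) / 2 = childpos →
            (startpos < childpos →
              (a.set pos (a.getD childpos 0)).getD ((childpos - 1) / 2) 0 ≤
                (a.set pos (a.getD childpos 0)).getD c 0) := by
          intro c hc hc1 hcp' _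
          rw [List.length_set] at hc
          have hpc : (childpos - 1) / 2 = pos := by omega
          rw [hpc, gset_self a pos _ hpos, gset_ne a pos c _ (by omega)]
          have h := hJ1 c hc hc1 (by omega) (by omega) (by omega)
          rw [hcp'] at h; exact h
        have IHc := IH (a.set pos (a.getD childpos 0)) childpos (2 * childpos + 1)
          (by omega) (by simpa using hend) (by simpa using hclt) rfl hsub' hJ1' hJ3'
        rw [List.length_set] at IHc
        rw [pySiftupGo, if_pos h1, if_neg h2]
        refine ⟨IHc.1, IHc.2.1, IHc.2.2.1, IHc.2.2.2.1, ?_⟩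
        intro x
        rw [IHc.2.2.2.2 x]
        exact mset_set_set a pos childpos x hpos hclt (by omega)
    · rw [pySiftupGo, if_neg h1]
      exact ⟨hpos, hsub, by omega, hJ1, fun x => rfl⟩

theorem su_spec (startpos endpos : Nat) (a : List Int) (pos childpos : Nat) :
    endpos = a.length → pos < a.length → childpos = 2 * pos + 1 →
    inSub startpos pos = true →
    (∀ j, j < a.length → 1 ≤ j → startpos ≤ (j - 1) / 2 → j ≠ pos → (j - 1) / 2 ≠ pos →
        a.getD ((j - 1) / 2) 0 ≤ a.getD j 0) →
    (∀ c, c < a.length → 1 ≤ c → (c - 1) / 2 = pos →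
        (startpos < pos → a.getD ((pos - 1) / 2) 0 ≤ a.getD c 0)) →
    (pySiftupLoop a pos childpos endpos).2 < a.length ∧
      inSub startpos (pySiftupLoop a pos childpos endpos).2 = true ∧
      a.length ≤ 2 * (pySiftupLoop a pos childpos endpos).2 + 1 ∧
      (∀ j, j < a.length → 1 ≤ j → startpos ≤ (j - 1) / 2 →
          j ≠ (pySiftupLoop a pos childpos endpos).2 →
          (j - 1) / 2 ≠ (pySiftupLoop a pos childpos endpos).2 →
          (pySiftupLoop a pos childpos endpos).1.getD ((j - 1) / 2) 0 ≤
            (pySiftupLoop a pos childpos endpos).1.getD j 0) ∧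
      (∀ x : Int, (↑((pySiftupLoop a pos childpos endpos).1.set
          (pySiftupLoop a pos childpos endpos).2 x) : Multiset Int) = ↑(a.set pos x)) := by
  intro hend hpos hcp hsub hJ1 hJ3
  exact suGo_spec (endpos - childpos) startpos endpos a pos childpos (le_refl _)
    hend hpos hcp hsub hJ1 hJ3

def isHeap (a : List Int) : Prop :=
  ∀ j, j < a.length → 1 ≤ j → a.getD ((j - 1) / 2) 0 ≤ a.getD j 0

theorem siftup_spec (a : List Int) (pos : Nat) (hpos : pos < a.length)
    (hpre : ∀ j, j < a.length → 1 ≤ j → pos < (j - 1) / 2 →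
      a.getD ((j - 1) / 2) 0 ≤ a.getD j 0) :
    (∀ j, j < a.length → 1 ≤ j → pos ≤ (j - 1) / 2 →
        (pySiftup a pos).getD ((j - 1) / 2) 0 ≤ (pySiftup a pos).getD j 0) ∧
      (↑(pySiftup a pos) : Multiset Int) = ↑a := by
  have hsu := su_spec pos a.length a pos (2 * pos + 1) rfl hpos rfl (inSub_self pos)
    (fun j hj hj1 hjs hjne hpjne => hpre j hj hj1 (by omega))
    (fun c hc hc1 hcp hlt => absurd hlt (lt_irrefl _))
  have hrl : (pySiftupLoop a pos (2 * pos + 1) a.length).1.length = a.length :=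
    length_pySiftupLoop a pos (2 * pos + 1) a.length
  have hr2 : (pySiftupLoop a pos (2 * pos + 1) a.length).2 < a.length := hsu.1
  have hbv : ((pySiftupLoop a pos (2 * pos + 1) a.length).1.set
      (pySiftupLoop a pos (2 * pos + 1) a.length).2 (a.getD pos 0)).getD
      (pySiftupLoop a pos (2 * pos + 1) a.length).2 0 = a.getD pos 0 :=
    gset_self _ _ _ (by omega)
  have hsd := sd_spec pos (a.getD pos 0)
    ((pySiftupLoop a pos (2 * pos + 1) a.length).1.set
      (pySiftupLoop a pos (2 * pos + 1) a.length).2 (a.getD pos 0))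
    (pySiftupLoop a pos (2 * pos + 1) a.length).2
    (by simpa [hrl] using hr2) hsu.2.1
    (by
      intro j hj hj1 hjs hjne hpjne
      rw [List.length_set, hrl] at hj
      rw [gset_ne _ _ _ _ (fun h => hpjne h.symm), gset_ne _ _ _ _ (fun h => hjne h.symm)]
      exact hsu.2.2.2.1 j hj hj1 hjs hjne hpjne)
    (by
      intro c hc hc1 hcp
      rw [List.length_set, hrl] at hc
      have := hsu.2.2.1
      omega)
  constructor
  · intro j hj hj1 hjs
    show (pySiftdownLoop _ _ _ _).getD ((j - 1) / 2) 0 ≤ (pySiftdownLoop _ _ _ _).getD j 0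
    rw [hbv]
    exact hsd.1 j (by simp [hrl, hj]) hj1 hjs
  · show (↑(pySiftdownLoop _ _ _ _) : Multiset Int) = ↑a
    rw [hbv, hsd.2, List.set_set]
    rw [hsu.2.2.2.2 (a.getD pos 0), set_getD_self a pos hpos]

theorem heapify_fold_spec : ∀ (k : Nat) (a : List Int), 2 * k ≤ a.length →
    (∀ j, j < a.length → 1 ≤ j → k ≤ (j - 1) / 2 → a.getD ((j - 1) / 2) 0 ≤ a.getD j 0) →
    isHeap ((List.range k).reverse.foldl (fun h i => pySiftup h i) a) ∧
      (↑((List.range k).reverse.foldl (fun h i => pySiftup h i) a) : Multiset Int) = ↑a ∧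
      ((List.range k).reverse.foldl (fun h i => pySiftup h i) a).length = a.length := by
  intro k
  induction k with
  | zero =>
    intro a _ hpre
    exact ⟨fun j hj hj1 => hpre j hj hj1 (by omega), rfl, rfl⟩
  | succ k IH =>
    intro a hk hpre
    have hrange : (List.range (k + 1)).reverse = k :: (List.range k).reverse := by
      rw [List.range_succ, List.reverse_append]; rfl
    rw [hrange]
    show isHeap ((List.range k).reverse.foldl _ (pySiftup a k)) ∧ _ ∧ _
    have hklt : k < a.length := by omega
    have hsp := siftup_spec a k hklt (fun j hj hj1 hjs => hpre j hj hj1 (by omega))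
    have hlen : (pySiftup a k).length = a.length := length_pySiftup a k
    have IHc := IH (pySiftup a k) (by omega)
      (fun j hj hj1 hjs => hsp.1 j (by omega) hj1 hjs)
    exact ⟨IHc.1, IHc.2.1.trans hsp.2, IHc.2.2.trans hlen⟩

theorem heapify_spec (a : List Int) :
    isHeap (pyHeapify a) ∧ (↑(pyHeapify a) : Multiset Int) = ↑a ∧
      (pyHeapify a).length = a.length := by
  have h := heapify_fold_spec (a.length / 2) a (by omega)
    (fun j hj hj1 hjs => by omega)
  exact h

theorem push_spec (h : List Int) (x : Int) (hh : isHeap h) :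
    isHeap (pyHeappush h x) ∧ (↑(pyHeappush h x) : Multiset Int) = x ::ₘ ↑h := by
  have hxv : (h ++ [x]).getD h.length 0 = x := by
    rw [List.getD_eq_getElem _ _ (by simp)]
    exact List.getElem_concat_length rfl _
  have hleft : ∀ i, i < h.length → (h ++ [x]).getD i 0 = h.getD i 0 := by
    intro i hi
    rw [List.getD_eq_getElem _ _ (by simp; omega), List.getD_eq_getElem _ _ hi]
    exact List.getElem_append_left ..
  have hsd := sd_spec 0 x (h ++ [x]) h.length (by simp) (inSub_zero _)
    (by
      intro j hj hj1 _ hjne hpjne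
      simp at hj
      rw [hleft j (by omega), hleft ((j - 1) / 2) (by omega)]
      exact hh j (by omega) hj1)
    (by intro c hc hc1 hcp; simp at hc; omega)
  have heq : pyHeappush h x = pySiftdownLoop (h ++ [x]) 0 h.length x := by
    show pySiftdownLoop _ _ _ ((h ++ [x]).getD h.length 0) = _
    rw [hxv]
  constructor
  · intro j hj hj1
    rw [heq]
    rw [heq, length_pySiftdownLoop] at hj
    exact hsd.1 j (by simpa using hj) hj1 (by omega)
  · rw [heq, hsd.2]
    have : (h ++ [x]).set h.length x = h ++ [x] := by
      have := set_getD_self (h ++ [x]) h.length (by simp)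
      rwa [hxv] at this
    rw [this]
    show ((h ++ [x] : List Int) : Multiset Int) = ((x :: h : List Int) : Multiset Int)
    exact Multiset.coe_eq_coe.mpr (List.perm_append_singleton x h)

theorem heap_min (a : List Int) (hh : isHeap a) :
    ∀ j, j < a.length → a.getD 0 0 ≤ a.getD j 0 := by
  intro j
  induction j using Nat.strong_induction_on with
  | _ j IH =>
    intro hj
    rcases Nat.eq_zero_or_pos j with h0 | h1
    · subst h0; exact le_refl _
    · exact le_trans (IH ((j - 1) / 2) (by omega) (by omega)) (hh j hj (by omega))

theorem heap_min_mem (a : List Int) (hh : isHeap a) :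
    ∀ v ∈ a, a.getD 0 0 ≤ v := by
  intro v hv
  obtain ⟨j, hj, rfl⟩ := List.mem_iff_getElem.mp hv
  rw [← List.getD_eq_getElem a 0 hj]
  exact heap_min a hh j hj

theorem getD_dropLast (h : List Int) (i : Nat) (hi : i < h.length - 1) :
    h.dropLast.getD i 0 = h.getD i 0 := by
  rw [List.getD_eq_getElem _ _ (by simp; omega), List.getD_eq_getElem _ _ (by omega)]
  exact List.getElem_dropLast ..

theorem getLastD_eq (h : List Int) (hne : h ≠ []) : h.getLastD 0 = h.getLast hne := by
  rw [List.getLastD_eq_getLast?, List.getLast?_eq_some_getLast hne]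
  rfl

theorem pop_spec (h : List Int) (hne : 0 < h.length) (hh : isHeap h) :
    (pyHeappop h).1 = h.getD 0 0 ∧ isHeap (pyHeappop h).2 ∧
      (↑h : Multiset Int) = (pyHeappop h).1 ::ₘ ↑(pyHeappop h).2 := by
  have hsplit : h.dropLast ++ [h.getLastD 0] = h := by
    rw [getLastD_eq h (by intro hh0; subst hh0; simp at hne)]
    exact List.dropLast_append_getLast _
  by_cases hE : h.dropLast.isEmpty
  · have hlen : h.length = 1 := by
      rw [List.isEmpty_iff] at hE
      have := congrArg List.length hsplit
      simp [hE] at this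
      omega
    obtain ⟨y, rfl⟩ : ∃ y, h = [y] := by
      cases h with
      | nil => simp at hne
      | cons y t =>
        cases t with
        | nil => exact ⟨y, rfl⟩
        | cons z t' => simp at hlen
    unfold pyHeappop
    rw [if_pos hE]
    refine ⟨rfl, ?_, rfl⟩
    intro j hj; simp at hj
  · have hlen2 : 2 ≤ h.length := by
      rcases Nat.lt_or_ge h.length 2 with hl | hl
      · exfalso
        have := congrArg List.length hsplit
        simp at this
        rw [List.isEmpty_iff] at hE
        have : h.dropLast.length = 0 ∨ h.dropLast.length ≥ 1 := by omega
        rcases this with h0 | h1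
        · exact hE (List.eq_nil_of_length_eq_zero h0)
        · simp at h1; omega
      · exact hl
    have hrestlen : h.dropLast.length = h.length - 1 := by simp
    have hrlen : (h.dropLast.set 0 (h.getLastD 0)).length = h.length - 1 := by simp [hrestlen]
    have hsp := siftup_spec (h.dropLast.set 0 (h.getLastD 0)) 0 (by omega)
      (by
        intro j hj hj1 hjs
        rw [hrlen] at hj
        rw [gset_ne _ _ _ _ (by omega), gset_ne _ _ _ _ (by omega),
          getD_dropLast h j (by omega), getD_dropLast h ((j - 1) / 2) (by omega)]
        exact hh j (by omega) (by omega))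
    unfold pyHeappop
    rw [if_neg hE]
    refine ⟨?_, ?_, ?_⟩
    · show h.dropLast.getD 0 0 = h.getD 0 0
      exact getD_dropLast h 0 (by omega)
    · intro j hj hj1
      exact hsp.1 j (by rw [length_pySiftup] at hj; exact hj) hj1 (by omega)
    · show (↑h : Multiset Int) = h.dropLast.getD 0 0 ::ₘ ↑(pySiftup (h.dropLast.set 0 (h.getLastD 0)) 0)
      rw [hsp.2]
      have hms := mset_set h.dropLast 0 (h.getLastD 0) (by omega)
      calc (↑h : Multiset Int) = ↑(h.dropLast ++ [h.getLastD 0]) := by rw [hsplit]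
        _ = ↑(h.getLastD 0 :: h.dropLast : List Int) :=
            Multiset.coe_eq_coe.mpr (List.perm_append_singleton _ _)
        _ = h.getLastD 0 ::ₘ ↑h.dropLast := rfl
        _ = ↑(h.dropLast.set 0 (h.getLastD 0)) + {h.dropLast.getD 0 0} := hms.symm
        _ = h.dropLast.getD 0 0 ::ₘ ↑(h.dropLast.set 0 (h.getLastD 0)) := by
            rw [add_comm, Multiset.singleton_add]

-- B-side lemmas ---------------------------------------------------------------

-- the loop invariant of B: both fronts are minima, and every queue element is
-- ≤ 3·(any other element of the state), which keeps appended mixes in order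
def InvB (rest q : List Int) : Prop :=
  rest.Pairwise (· ≤ ·) ∧ q.Pairwise (· ≤ ·) ∧
  (∀ p ∈ q, ∀ v ∈ rest, p ≤ 3 * v) ∧
  q.Pairwise (fun a b => a ≤ 3 * b ∧ b ≤ 3 * a)

theorem popMinB_spec (rest q : List Int)
    (hr : rest.Pairwise (· ≤ ·)) (hq : q.Pairwise (· ≤ ·))
    (hne : rest ++ q ≠ []) :
    (↑(rest ++ q) : Multiset Int)
        = (popMinB rest q).1 ::ₘ ↑((popMinB rest q).2.1 ++ (popMinB rest q).2.2) ∧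
      (∀ v ∈ rest ++ q, (popMinB rest q).1 ≤ v) ∧
      (((popMinB rest q).2.1 = rest ∧ q = (popMinB rest q).1 :: (popMinB rest q).2.2) ∨
        (rest = (popMinB rest q).1 :: (popMinB rest q).2.1 ∧ (popMinB rest q).2.2 = q)) := by
  match rest, q with
  | [], [] => exact absurd rfl hne
  | x :: r, [] =>
    rw [List.pairwise_cons] at hr
    refine ⟨rfl, ?_, Or.inr ⟨rfl, rfl⟩⟩
    intro v hv
    simp only [List.append_nil, List.mem_cons] at hv
    rcases hv with rfl | hv
    · exact le_refl _
    · exact hr.1 v hv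
  | [], p :: qt =>
    rw [List.pairwise_cons] at hq
    refine ⟨rfl, ?_, Or.inl ⟨rfl, rfl⟩⟩
    intro v hv
    simp only [List.nil_append, List.mem_cons] at hv
    rcases hv with rfl | hv
    · exact le_refl _
    · exact hq.1 v hv
  | x :: r, p :: qt =>
    rw [List.pairwise_cons] at hr hq
    by_cases hxp : x ≤ p
    · have hpm : popMinB (x :: r) (p :: qt) = (x, r, p :: qt) := by
        show (if x ≤ p then ((x : Int), r, p :: qt) else (p, x :: r, qt)) = _; rw [if_pos hxp]
      rw [hpm]
      refine ⟨rfl, ?_, Or.inr ⟨rfl, rfl⟩⟩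
      intro v hv
      rcases List.mem_append.mp hv with hv | hv
      · rcases List.mem_cons.mp hv with rfl | hv
        · exact le_refl _
        · exact hr.1 v hv
      · rcases List.mem_cons.mp hv with rfl | hv
        · exact hxp
        · exact le_trans hxp (hq.1 v hv)
    · have hpm : popMinB (x :: r) (p :: qt) = (p, x :: r, qt) := by
        show (if x ≤ p then ((x : Int), r, p :: qt) else (p, x :: r, qt)) = _; rw [if_neg hxp]
      rw [hpm]
      refine ⟨?_, ?_, Or.inl ⟨rfl, rfl⟩⟩
      · show (↑(x :: r) + ↑(p :: qt) : Multiset Int) = p ::ₘ (↑(x :: r) + ↑qt)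
        have h1 : (↑(p :: qt) : Multiset Int) = p ::ₘ ↑qt := rfl
        rw [h1, add_comm, Multiset.cons_add, add_comm]
      · intro v hv
        rcases List.mem_append.mp hv with hv | hv
        · rcases List.mem_cons.mp hv with rfl | hv
          · omega
          · have := hr.1 v hv; omega
        · rcases List.mem_cons.mp hv with rfl | hv
          · exact le_refl _
          · exact hq.1 v hv

-- the popped state keeps the invariant, and surviving queue elements are
-- ≤ 3·(the popped value)
theorem popMinB_inv (rest q : List Int) (h : InvB rest q) (hne : rest ++ q ≠ []) :
    InvB (popMinB rest q).2.1 (popMinB rest q).2.2 ∧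
      (∀ p ∈ (popMinB rest q).2.2, p ≤ 3 * (popMinB rest q).1) := by
  obtain ⟨hr, hq, hrq, h3⟩ := h
  have hspec := (popMinB_spec rest q hr hq hne).2.2
  rcases hP : popMinB rest q with ⟨f, r1, q1⟩
  rw [hP] at hspec
  dsimp only at hspec ⊢
  rcases hspec with ⟨he1, he2⟩ | ⟨he1, he2⟩
  · -- popped from q
    subst he1; subst he2
    rw [List.pairwise_cons] at hq h3
    refine ⟨⟨hr, hq.2, ?_, h3.2⟩, fun p hp => (h3.1 p hp).2⟩
    intro p hp v hv
    exact hrq p (List.mem_cons_of_mem _ hp) v hv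
  · -- popped from rest
    subst he2; subst he1
    rw [List.pairwise_cons] at hr
    refine ⟨⟨hr.2, hq, ?_, h3⟩, ?_⟩
    · intro p hp v hv
      exact hrq p hp v (List.mem_cons_of_mem _ hv)
    · intro p hp
      exact hrq p hp f List.mem_cons_self

-- appending the new mix keeps the invariant
theorem push_inv (r2 q2 : List Int) (f s : Int) (h : InvB r2 q2)
    (hfs : f ≤ s)
    (hmin : ∀ v ∈ r2 ++ q2, s ≤ v)
    (h3f : ∀ p ∈ q2, p ≤ 3 * f)
    (h3s : ∀ p ∈ q2, p ≤ 3 * s) :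
    InvB r2 (q2 ++ [f + 2 * s]) := by
  obtain ⟨hr, hq, hrq, h3⟩ := h
  refine ⟨hr, ?_, ?_, ?_⟩
  · rw [List.pairwise_append]
    refine ⟨hq, by simp, ?_⟩
    intro a ha b hb
    rw [List.mem_singleton] at hb
    subst hb
    have := h3f a ha
    have := h3s a ha
    omega
  · intro p hp v hv
    rcases List.mem_append.mp hp with hp | hp
    · exact hrq p hp v hv
    · rw [List.mem_singleton] at hp
      subst hp
      have := hmin v (List.mem_append.mpr (Or.inl hv))
      omega
  · rw [List.pairwise_append]
    refine ⟨h3, by simp, ?_⟩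
    intro a ha b hb
    rw [List.mem_singleton] at hb
    subst hb
    have h1 := h3f a ha
    have h2 := h3s a ha
    have h4 := hmin a (List.mem_append.mpr (Or.inr ha))
    constructor <;> omega

theorem popMinB_length (rest q : List Int) (hne : rest ++ q ≠ []) :
    (popMinB rest q).2.1.length + (popMinB rest q).2.2.length + 1 = rest.length + q.length := by
  match rest, q with
  | [], [] => exact absurd rfl hne
  | x :: r, [] => simp [popMinB]
  | [], p :: qt => simp [popMinB]
  | x :: r, p :: qt =>
    have hpm : popMinB (x :: r) (p :: qt)
        = if x ≤ p then ((x : Int), r, p :: qt) else (p, x :: r, qt) := rfl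
    rw [hpm]
    split_ifs <;> simp <;> omega

-- fuel irrelevance for the two loops -----------------------------------------

theorem loopAGo_fuel : ∀ (f1 f2 : Nat) (heap : List Int) (K ans : Int),
    heap.length ≤ f1 → heap.length ≤ f2 →
    loopAGo f1 heap K ans = loopAGo f2 heap K ans := by
  intro f1
  induction f1 with
  | zero =>
    intro f2 heap K ans h1 h2
    have hsmall : ¬ 1 < heap.length := by omega
    cases f2 with
    | zero => rfl
    | succ f2 =>
      show (heap, ans) = loopAGo (f2 + 1) heap K ans
      rw [loopAGo, if_neg hsmall]
  | succ f1 IH =>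
    intro f2 heap K ans h1 h2
    by_cases hbig : 1 < heap.length
    · cases f2 with
      | zero => omega
      | succ f2 =>
        rw [loopAGo]
        conv_rhs => rw [loopAGo]
        rw [if_pos hbig, if_pos hbig]
        by_cases hK : (pyHeappop heap).1 ≥ K
        · rw [if_pos hK, if_pos hK]
        · rw [if_neg hK, if_neg hK]
          have hlen : (pyHeappush (pyHeappop (pyHeappop heap).2).2
              ((pyHeappop heap).1 + (pyHeappop (pyHeappop heap).2).1 * 2)).length
              = heap.length - 1 := by
            rw [length_pyHeappush, length_pyHeappop, length_pyHeappop]; omega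
          exact IH f2 _ K (ans + 1) (by omega) (by omega)
    · cases f2 with
      | zero =>
        show loopAGo (f1 + 1) heap K ans = (heap, ans)
        rw [loopAGo, if_neg hbig]
      | succ f2 =>
        rw [loopAGo]
        conv_rhs => rw [loopAGo]
        rw [if_neg hbig, if_neg hbig]

theorem loopBGo_fuel : ∀ (f1 f2 : Nat) (rest q : List Int) (K ans : Int),
    rest.length + q.length ≤ f1 + 1 → rest.length + q.length ≤ f2 + 1 →
    loopBGo f1 rest q K ans = loopBGo f2 rest q K ans := by
  intro f1
  induction f1 with
  | zero =>
    intro f2 rest q K ans h1 h2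
    have hsmall : ¬ 1 < rest.length + q.length := by omega
    cases f2 with
    | zero => rfl
    | succ f2 =>
      show (if (rest ++ q).getD 0 0 ≥ K then ans else -1) = loopBGo (f2 + 1) rest q K ans
      rw [loopBGo, if_neg hsmall]
  | succ f1 IH =>
    intro f2 rest q K ans h1 h2
    by_cases hbig : 1 < rest.length + q.length
    · cases f2 with
      | zero => omega
      | succ f2 =>
        rw [loopBGo]
        conv_rhs => rw [loopBGo]
        rw [if_pos hbig, if_pos hbig]
        by_cases hK : (popMinB rest q).1 ≥ K
        · rw [if_pos hK, if_pos hK]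
        · rw [if_neg hK, if_neg hK]
          have hne : rest ++ q ≠ [] := by
            intro h0; have hz := congrArg List.length h0; rw [List.length_append] at hz; simp only [List.length_nil] at hz; omega
          have hl1 := popMinB_length rest q hne
          have hne2 : (popMinB rest q).2.1 ++ (popMinB rest q).2.2 ≠ [] := by
            intro h0; have hz := congrArg List.length h0; rw [List.length_append] at hz; simp only [List.length_nil] at hz; omega
          have hl2 := popMinB_length (popMinB rest q).2.1 (popMinB rest q).2.2 hne2
          apply IH
          · simp only [List.length_append, List.length_cons, List.length_nil]; omega
          · simp only [List.length_append, List.length_cons, List.length_nil]; omega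
    · cases f2 with
      | zero =>
        show loopBGo (f1 + 1) rest q K ans = (if (rest ++ q).getD 0 0 ≥ K then ans else -1)
        rw [loopBGo, if_neg hbig]
      | succ f2 =>
        rw [loopBGo]
        conv_rhs => rw [loopBGo]
        rw [if_neg hbig, if_neg hbig]

-- one-step unfolding of the loops ---------------------------------------------

theorem loopA_small (h : List Int) (K ans : Int) (hsmall : ¬ 1 < h.length) :
    loopA h K ans = (h, ans) := by
  show loopAGo h.length h K ans = (h, ans)
  cases hl : h.length with
  | zero => rfl
  | succ m => rw [loopAGo, if_neg hsmall]

theorem loopA_break (h : List Int) (K ans : Int) (hbig : 1 < h.length)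
    (hK : (pyHeappop h).1 ≥ K) :
    loopA h K ans = ((pyHeappop h).2, ans) := by
  show loopAGo h.length h K ans = _
  obtain ⟨m, hm⟩ : ∃ m, h.length = m + 1 := ⟨h.length - 1, by omega⟩
  rw [hm, loopAGo, if_pos (by omega : 1 < h.length), if_pos hK]

theorem loopA_rec (h : List Int) (K ans : Int) (hbig : 1 < h.length)
    (hK : ¬ (pyHeappop h).1 ≥ K) :
    loopA h K ans = loopA (pyHeappush (pyHeappop (pyHeappop h).2).2
        ((pyHeappop h).1 + (pyHeappop (pyHeappop h).2).1 * 2)) K (ans + 1) := by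
  show loopAGo h.length h K ans = _
  obtain ⟨m, hm⟩ : ∃ m, h.length = m + 1 := ⟨h.length - 1, by omega⟩
  rw [hm, loopAGo, if_pos (by omega : 1 < h.length), if_neg hK]
  have hlen : (pyHeappush (pyHeappop (pyHeappop h).2).2
      ((pyHeappop h).1 + (pyHeappop (pyHeappop h).2).1 * 2)).length = h.length - 1 := by
    rw [length_pyHeappush, length_pyHeappop, length_pyHeappop]; omega
  exact loopAGo_fuel m _ _ K (ans + 1) (by omega) (by omega)

theorem loopB_small (rest q : List Int) (K ans : Int)
    (hsmall : ¬ 1 < rest.length + q.length) :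
    loopB rest q K ans = (if (rest ++ q).getD 0 0 ≥ K then ans else -1) := by
  show loopBGo (rest.length + q.length) rest q K ans = _
  cases hl : rest.length + q.length with
  | zero => rw [loopBGo]
  | succ m => rw [loopBGo, if_neg (by omega)]

theorem loopB_break (rest q : List Int) (K ans : Int)
    (hbig : 1 < rest.length + q.length) (hK : (popMinB rest q).1 ≥ K) :
    loopB rest q K ans = ans := by
  show loopBGo (rest.length + q.length) rest q K ans = _
  obtain ⟨m, hm⟩ : ∃ m, rest.length + q.length = m + 1 :=
    ⟨rest.length + q.length - 1, by omega⟩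
  rw [hm, loopBGo, if_pos (by omega : 1 < rest.length + q.length), if_pos hK]

theorem loopB_rec (rest q : List Int) (K ans : Int)
    (hbig : 1 < rest.length + q.length) (hK : ¬ (popMinB rest q).1 ≥ K) :
    loopB rest q K ans
      = loopB (popMinB (popMinB rest q).2.1 (popMinB rest q).2.2).2.1
          ((popMinB (popMinB rest q).2.1 (popMinB rest q).2.2).2.2 ++
            [(popMinB rest q).1 + 2 * (popMinB (popMinB rest q).2.1 (popMinB rest q).2.2).1])
          K (ans + 1) := by
  show loopBGo (rest.length + q.length) rest q K ans = _
  obtain ⟨m, hm⟩ : ∃ m, rest.length + q.length = m + 1 :=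
    ⟨rest.length + q.length - 1, by omega⟩
  rw [hm, loopBGo, if_pos (by omega : 1 < rest.length + q.length), if_neg hK]
  have hne : rest ++ q ≠ [] := by
    intro h0; have hz := congrArg List.length h0; rw [List.length_append] at hz; simp only [List.length_nil] at hz; omega
  have hl1 := popMinB_length rest q hne
  have hne2 : (popMinB rest q).2.1 ++ (popMinB rest q).2.2 ≠ [] := by
    intro h0; have hz := congrArg List.length h0; rw [List.length_append] at hz; simp only [List.length_nil] at hz; omega
  have hl2 := popMinB_length (popMinB rest q).2.1 (popMinB rest q).2.2 hne2
  apply loopBGo_fuel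
  · simp only [List.length_append, List.length_cons, List.length_nil]; omega
  · simp only [List.length_append, List.length_cons, List.length_nil]; omega

-- the main loop simulation ----------------------------------------------------

theorem loop_eq : ∀ (n : Nat) (h rest q : List Int) (K ans : Int),
    h.length = n → 0 < h.length → isHeap h → InvB rest q →
    (↑h : Multiset Int) = ↑(rest ++ q) →
    (if (loopA h K ans).1.getD 0 0 ≥ K then (loopA h K ans).2 else -1) = loopB rest q K ans := by
  intro n
  induction n using Nat.strong_induction_on with
  | _ n IH =>
    intro h rest q K ans hlen hpos hheap hinv hms
    have hsize : rest.length + q.length = h.length := by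
      have := congrArg Multiset.card hms
      simp at this
      omega
    have hne : rest ++ q ≠ [] := by
      intro h0; have hz := congrArg List.length h0; rw [List.length_append] at hz; simp only [List.length_nil] at hz; omega
    have spec1 := popMinB_spec rest q hinv.1 hinv.2.1 hne
    have inv1 := popMinB_inv rest q hinv hne
    by_cases hbig : 1 < h.length
    · -- at least two elements
      have hps := pop_spec h (by omega) hheap
      -- the heap root and the merge front are the same value
      have hfmem : (popMinB rest q).1 ∈ h := by
        show (popMinB rest q).1 ∈ (↑h : Multiset Int)
        rw [hms, spec1.1]
        exact Multiset.mem_cons_self _ _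
      have hAmem : (pyHeappop h).1 ∈ rest ++ q := by
        show (pyHeappop h).1 ∈ (↑(rest ++ q) : Multiset Int)
        rw [← hms, hps.1]
        show h.getD 0 0 ∈ (↑h : Multiset Int)
        rw [List.getD_eq_getElem _ _ (by omega : 0 < h.length)]
        exact List.getElem_mem _
      have hf : (pyHeappop h).1 = (popMinB rest q).1 := by
        have h1 : (pyHeappop h).1 ≤ (popMinB rest q).1 := by
          rw [hps.1]; exact heap_min_mem h hheap _ hfmem
        have h2 : (popMinB rest q).1 ≤ (pyHeappop h).1 := spec1.2.1 _ hAmem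
        omega
      by_cases hK : (pyHeappop h).1 ≥ K
      · -- break: A's remaining root is ≥ K, so both return ans
        rw [loopA_break h K ans hbig hK]
        have hroot : (pyHeappop h).2.getD 0 0 ∈ h := by
          show (pyHeappop h).2.getD 0 0 ∈ (↑h : Multiset Int)
          rw [hps.2.2]
          refine Multiset.mem_cons_of_mem ?_
          show _ ∈ (↑(pyHeappop h).2 : Multiset Int)
          have hl2 : 0 < (pyHeappop h).2.length := by rw [length_pyHeappop]; omega
          rw [List.getD_eq_getElem _ _ hl2]
          exact List.getElem_mem _
        have hge : (pyHeappop h).1 ≤ (pyHeappop h).2.getD 0 0 := by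
          rw [hps.1]; exact heap_min_mem h hheap _ hroot
        rw [if_pos (by omega : (pyHeappop h).2.getD 0 0 ≥ K)]
        rw [loopB_break rest q K ans (by omega) (by omega)]
      · -- recurse
        rw [loopA_rec h K ans hbig hK]
        -- second pop on both sides
        have hms1 : (↑(pyHeappop h).2 : Multiset Int)
            = ↑((popMinB rest q).2.1 ++ (popMinB rest q).2.2) := by
          have hc : (pyHeappop h).1 ::ₘ (↑(pyHeappop h).2 : Multiset Int)
              = (pyHeappop h).1 ::ₘ ↑((popMinB rest q).2.1 ++ (popMinB rest q).2.2) := by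
            rw [← hps.2.2, hms, spec1.1, hf]
          exact (Multiset.cons_inj_right _).mp hc
        have hlen1 : (pyHeappop h).2.length = h.length - 1 := length_pyHeappop h
        have hne2 : (popMinB rest q).2.1 ++ (popMinB rest q).2.2 ≠ [] := by
          intro h0
          have hcard := congrArg Multiset.card hms1
          rw [h0] at hcard
          simp only [Multiset.coe_card, List.length_nil] at hcard
          omega
        have spec2 := popMinB_spec (popMinB rest q).2.1 (popMinB rest q).2.2
          inv1.1.1 inv1.1.2.1 hne2
        have inv2 := popMinB_inv (popMinB rest q).2.1 (popMinB rest q).2.2 inv1.1 hne2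
        have hps2 := pop_spec (pyHeappop h).2 (by omega) hps.2.1
        have hs2mem : (popMinB (popMinB rest q).2.1 (popMinB rest q).2.2).1
            ∈ (popMinB rest q).2.1 ++ (popMinB rest q).2.2 := by
          show _ ∈ (↑((popMinB rest q).2.1 ++ (popMinB rest q).2.2) : Multiset Int)
          rw [spec2.1]
          exact Multiset.mem_cons_self _ _
        have hA2mem : (pyHeappop (pyHeappop h).2).1
            ∈ (popMinB rest q).2.1 ++ (popMinB rest q).2.2 := by
          show _ ∈ (↑((popMinB rest q).2.1 ++ (popMinB rest q).2.2) : Multiset Int)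
          rw [← hms1, hps2.1]
          show (pyHeappop h).2.getD 0 0 ∈ (↑(pyHeappop h).2 : Multiset Int)
          rw [List.getD_eq_getElem _ _ (by omega : 0 < (pyHeappop h).2.length)]
          exact List.getElem_mem _
        have hs2memh : (popMinB (popMinB rest q).2.1 (popMinB rest q).2.2).1
            ∈ (pyHeappop h).2 := by
          show _ ∈ (↑(pyHeappop h).2 : Multiset Int)
          rw [hms1]
          exact hs2mem
        have hs : (pyHeappop (pyHeappop h).2).1
            = (popMinB (popMinB rest q).2.1 (popMinB rest q).2.2).1 := by
          have h1 : (pyHeappop (pyHeappop h).2).1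
              ≤ (popMinB (popMinB rest q).2.1 (popMinB rest q).2.2).1 := by
            rw [hps2.1]; exact heap_min_mem _ hps.2.1 _ hs2memh
          have h2 := spec2.2.1 _ hA2mem
          omega
        -- abbreviations
        set f := (popMinB rest q).1 with hfdef
        set P2 := popMinB (popMinB rest q).2.1 (popMinB rest q).2.2 with hP2
        -- multiset after second pop
        have hms2 : (↑(pyHeappop (pyHeappop h).2).2 : Multiset Int) = ↑(P2.2.1 ++ P2.2.2) := by
          have hc : P2.1 ::ₘ (↑(pyHeappop (pyHeappop h).2).2 : Multiset Int)
              = P2.1 ::ₘ ↑(P2.2.1 ++ P2.2.2) := by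
            rw [← hs, ← hps2.2.2, hms1, spec2.1, hs]
          exact (Multiset.cons_inj_right _).mp hc
        -- push
        have hpush := push_spec (pyHeappop (pyHeappop h).2).2
          ((pyHeappop h).1 + (pyHeappop (pyHeappop h).2).1 * 2) hps2.2.1
        have hmix : (pyHeappop h).1 + (pyHeappop (pyHeappop h).2).1 * 2
            = f + 2 * P2.1 := by rw [hf, hs]; ring
        have hq2app : (↑(P2.2.2 ++ [f + 2 * P2.1]) : Multiset Int)
            = (f + 2 * P2.1) ::ₘ ↑P2.2.2 :=
          Multiset.coe_eq_coe.mpr (List.perm_append_singleton _ _)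
        have hms3 : (↑(pyHeappush (pyHeappop (pyHeappop h).2).2
            ((pyHeappop h).1 + (pyHeappop (pyHeappop h).2).1 * 2)) : Multiset Int)
            = ↑(P2.2.1 ++ (P2.2.2 ++ [f + 2 * P2.1])) := by
          rw [hpush.2, hms2, hmix]
          show (f + 2 * P2.1) ::ₘ (↑P2.2.1 + ↑P2.2.2)
              = ↑P2.2.1 + (↑(P2.2.2 ++ [f + 2 * P2.1]) : Multiset Int)
          rw [hq2app, Multiset.add_cons]
        -- invariant for the new B state
        have hfs : f ≤ P2.1 := by
          have hm : P2.1 ∈ rest ++ q := by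
            show P2.1 ∈ (↑(rest ++ q) : Multiset Int)
            rw [spec1.1]
            exact Multiset.mem_cons_of_mem hs2mem
          exact spec1.2.1 _ hm
        have hsurv : ∀ v ∈ P2.2.1 ++ P2.2.2, v ∈ (popMinB rest q).2.1 ++ (popMinB rest q).2.2 := by
          intro v hv
          show v ∈ (↑((popMinB rest q).2.1 ++ (popMinB rest q).2.2) : Multiset Int)
          rw [spec2.1]
          exact Multiset.mem_cons_of_mem hv
        have hq2sub : ∀ p ∈ P2.2.2, p ∈ (popMinB rest q).2.2 := by
          intro p hp
          rcases spec2.2.2 with ⟨he1, he2⟩ | ⟨he1, he2⟩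
          · rw [he2]; exact List.mem_cons_of_mem _ hp
          · rw [← he2]; exact hp
        have hinv3 : InvB P2.2.1 (P2.2.2 ++ [f + 2 * P2.1]) := by
          refine push_inv P2.2.1 P2.2.2 f P2.1 inv2.1 hfs ?_ ?_ inv2.2
          · intro v hv
            exact spec2.2.1 v (hsurv v hv)
          · intro p hp
            exact inv1.2 p (hq2sub p hp)
        -- lengths
        have hpushlen : (pyHeappush (pyHeappop (pyHeappop h).2).2
            ((pyHeappop h).1 + (pyHeappop (pyHeappop h).2).1 * 2)).length = h.length - 1 := by
          rw [length_pyHeappush, length_pyHeappop, length_pyHeappop]; omega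
        have hB : loopB rest q K ans
            = loopB P2.2.1 (P2.2.2 ++ [f + 2 * P2.1]) K (ans + 1) :=
          loopB_rec rest q K ans (by omega) (by rw [← hfdef]; omega)
        rw [hB]
        exact IH (h.length - 1) (by omega) _ _ _ K (ans + 1) hpushlen (by omega)
          hpush.1 hinv3 hms3
    · -- exactly one element
      have hone : h.length = 1 := by omega
      obtain ⟨a0, rfl⟩ : ∃ a0, h = [a0] := by
        cases h with
        | nil => simp at hone
        | cons a0 t0 =>
          cases t0 with
          | nil => exact ⟨a0, rfl⟩
          | cons b0 t1 => simp at hone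
      have hrq : rest ++ q = [a0] :=
        List.perm_singleton.mp (Multiset.coe_eq_coe.mp hms).symm
      rw [loopA_small [a0] K ans hbig, loopB_small rest q K ans (by omega), hrq]

-- the assembled equivalence, used by the verdict theorem below
theorem solution_eq_alt : ∀ (scoville : List Int) (K : Int), Pre_solution scoville K →
    solution scoville K = solution_alt scoville K := by
  intro scoville K hpre
  unfold Pre_solution at hpre
  have hhs := heapify_spec scoville
  have hlen0 : 0 < scoville.length := List.length_pos_of_ne_nil hpre
  unfold solution solution_alt
  exact loop_eq (pyHeapify scoville).length (pyHeapify scoville)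
    (PySem.List.sorted scoville (fun x => x) false) [] K 0 rfl
    (by rw [hhs.2.2]; omega) hhs.1
    ⟨PySem.List.sorted_pairwise scoville (fun x => x), by simp, by simp, by simp⟩
    (by
      rw [hhs.2.1]
      simp only [List.append_nil]
      exact (Multiset.coe_eq_coe.mpr (PySem.List.sorted_perm scoville (fun x => x) false)).symm)

-- ===== VERDICT (by name: the statement is the Claim_ definition above) =====
theorem solution_spec : Claim_equal_solution := by
  intro scoville K _hdom hpre
  exact solution_eq_alt scoville K hpre
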